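-- pv_equiv track=rewrite | github.com/aryabartar/DFA-acceptor | DFA_acceptor.py | split_transitions
-- ===== SOURCE A (Python) =====
-- def split_transitions(transition):
--     found = False
--     array = []
--     for element in transition:
--         if element == "{":
--             found = True
--         elif found:
--             found = False
--             if element == "}":
--                 array.append("")
--             else :
--                 array.append(element)
--     return array
-- ===== SOURCE B (Python) =====
-- def split_transitions(transition):
--     return [("" if b == "}" else b)
--             for a, b in zip(transition, transition[1:])
--             if a == "{" and b != "{"]
-- ===== Notes on version B (the rewrite author's own statement) =====
-- stated objective: simpler
-- what changed: Replaces A's stateful flag-and-accumulator scan with a single stateless comprehension over adjacent character pairs (zip of the string with its tail).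
import Mathlib
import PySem

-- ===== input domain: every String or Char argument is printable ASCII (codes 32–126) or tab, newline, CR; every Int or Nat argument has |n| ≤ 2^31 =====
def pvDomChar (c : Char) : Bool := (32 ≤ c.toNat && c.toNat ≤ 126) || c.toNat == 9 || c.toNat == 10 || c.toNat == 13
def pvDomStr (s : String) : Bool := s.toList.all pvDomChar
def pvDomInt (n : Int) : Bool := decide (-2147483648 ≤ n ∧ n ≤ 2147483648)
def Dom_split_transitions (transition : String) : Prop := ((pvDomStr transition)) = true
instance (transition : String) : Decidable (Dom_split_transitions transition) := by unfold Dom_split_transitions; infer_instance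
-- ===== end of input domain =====

-- B replaces A's stateful 'found'-flag scan with a stateless comprehension over adjacent character pairs (simpler).

-- ===== PORT A =====
-- literal transliteration of A's flag-and-accumulator loop
def split_transitions (transition : String) : List String :=
  (transition.toList.foldl
    (fun (st : Bool × List String) element =>
      if element = '{' then (true, st.2)
      else if st.1 then (false, st.2 ++ [if element = '}' then "" else String.mk [element]])
      else st)
    (false, [])).2

-- ===== PORT B =====
-- literal transliteration of B's comprehension over zip(transition, transition[1:])
def split_transitions_alt (transition : String) : List String :=
  (transition.toList.zip transition.toList.tail).filterMap
    (fun p => if p.1 = '{' ∧ p.2 ≠ '{' then some (if p.2 = '}' then "" else String.mk [p.2]) else none)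

-- ===== PRECONDITION & SPEC =====
def Spec_split_transitions (transition : String) (out : List String) : Prop := out = split_transitions_alt transition
instance (transition : String) (out : List String) : Decidable (Spec_split_transitions transition out) := by unfold Spec_split_transitions; infer_instance

-- ===== CLAIM (what is proved, stated in full; the proofs are below) =====
def Claim_equal_split_transitions : Prop := ∀ (transition : String), Dom_split_transitions transition → Spec_split_transitions transition (split_transitions transition)

-- ===== LEMMAS AND PROOFS =====

-- the characters A's loop appends from list l when the flag starts as f
def pvExtra (f : Bool) : List Char → List String
  | [] => []
  | c :: rest =>
      if c = '{' then pvExtra true rest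
      else if f then (if c = '}' then "" else String.mk [c]) :: pvExtra false rest
      else pvExtra false rest

lemma pvLoop_eq (l : List Char) (f : Bool) (acc : List String) :
    (l.foldl
      (fun (st : Bool × List String) element =>
        if element = '{' then (true, st.2)
        else if st.1 then (false, st.2 ++ [if element = '}' then "" else String.mk [element]])
        else st)
      (f, acc)).2 = acc ++ pvExtra f l := by
  induction l generalizing f acc with
  | nil => simp [pvExtra]
  | cons c rest ih =>
      by_cases hc : c = '{'
      · simp [pvExtra, hc, ih]
      · cases f with
        | false => simp [pvExtra, hc, ih]
        | true => simp [pvExtra, hc, ih]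

lemma pvExtra_eq_zip (l : List Char) (c : Char) :
    pvExtra (decide (c = '{')) l =
      ((c :: l).zip l).filterMap
        (fun p => if p.1 = '{' ∧ p.2 ≠ '{' then some (if p.2 = '}' then "" else String.mk [p.2]) else none) := by
  induction l generalizing c with
  | nil => simp [pvExtra]
  | cons d rest ih =>
      by_cases hd : d = '{' <;> by_cases hc : c = '{' <;>
        simp [pvExtra, hd, hc, ← ih]

-- ===== VERDICT (by name: the statement is the Claim_ definition above) =====
theorem split_transitions_spec : Claim_equal_split_transitions := by
  intro t _
  unfold Spec_split_transitions split_transitions split_transitions_alt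
  rw [pvLoop_eq]
  cases h : t.toList with
  | nil => simp [pvExtra]
  | cons c rest =>
      have : pvExtra false (c :: rest) = pvExtra (decide (c = '{')) rest := by
        by_cases hc : c = '{' <;> simp [pvExtra, hc]
      simp [this, pvExtra_eq_zip]
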